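-- pv_equiv track=rewrite | github.com/lorara11/algorithms-and-data-structures | Course 1 - Algorithmic Toolbox/algorithmic-warmup/fibonacci_partial_sum.py | get_fibonacci_last_digit_with_pisano
-- ===== SOURCE A (Python) =====
-- def get_fibonacci_last_digit_with_pisano(n):
--     if n <= 1:
--         return n
--
--     pisano_period = 60      # Pisano period of 10 is 60
--
--     while n >= pisano_period:
--         if n % pisano_period != 0:
--             n = n % pisano_period
--         else:
--             break
--
--     # Compute the n_th Fibonacci number
--     previous = 0
--     current  = 1
--
--     for _ in range(n - 1):
--         previous, current = current, previous + current
--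
--     return current % 10
-- ===== SOURCE B (Python) =====
-- def get_fibonacci_last_digit_with_pisano(n):
--     if n <= 1:
--         return n
--     # Build the full 60-entry Pisano-period table of Fibonacci last digits once,
--     # then answer by a single index: table[k] == Fib(k) % 10 for 0 <= k < 60.
--     table = [0, 1]
--     a, b = 0, 1
--     for _ in range(58):
--         a, b = b, (a + b) % 10
--         table.append(b)
--     return table[n % 60]
-- ===== Notes on version B (the rewrite author's own statement) =====
-- stated objective: faster
-- what changed: B precomputes the 60-entry table of Fibonacci last digits (mod 10 at every step) and answers by indexing table[n % 60], instead of A's reduce-then-iterate loop that computes the full Fibonacci number (and iterates all the way to n when 60 divides n).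
import Mathlib
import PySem

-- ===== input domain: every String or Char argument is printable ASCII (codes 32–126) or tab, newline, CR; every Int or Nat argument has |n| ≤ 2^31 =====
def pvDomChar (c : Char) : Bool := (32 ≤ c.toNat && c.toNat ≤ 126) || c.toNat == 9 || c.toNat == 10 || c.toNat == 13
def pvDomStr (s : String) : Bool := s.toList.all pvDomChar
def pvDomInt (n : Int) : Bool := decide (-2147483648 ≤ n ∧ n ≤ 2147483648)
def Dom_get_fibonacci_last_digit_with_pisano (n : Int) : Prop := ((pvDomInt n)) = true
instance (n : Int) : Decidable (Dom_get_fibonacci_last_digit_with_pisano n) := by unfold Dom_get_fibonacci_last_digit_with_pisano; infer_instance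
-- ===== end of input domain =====

-- B replaces A's reduce-then-iterate loop by a precomputed 60-entry table of Fibonacci
-- last digits indexed by n % 60 (objective: faster — avoids iterating to n when 60 | n).

-- ===== PORT A =====
-- the `while n >= 60: if n % 60 != 0: n = n % 60 else: break` loop
def pisanoReduce (n : Int) : Int :=
  if _h : 60 ≤ n then
    if PySem.Int.mod n 60 ≠ 0 then pisanoReduce (PySem.Int.mod n 60) else n
  else n
termination_by n.toNat
decreasing_by
  have h1 := PySem.Int.mod_nonneg n (b := 60) (by omega)
  have h2 := PySem.Int.mod_lt n (b := 60) (by omega)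
  omega

-- `for _ in range(k): previous, current = current, previous + current`
def fibLoop : Nat → Int × Int → Int × Int
  | 0, s => s
  | k+1, (p, c) => fibLoop k (c, p + c)

def get_fibonacci_last_digit_with_pisano (n : Int) : Int :=
  if n ≤ 1 then n
  else
    let m := pisanoReduce n
    let pc := fibLoop (m - 1).toNat (0, 1)
    PySem.Int.mod pc.2 10

-- ===== PORT B =====
-- `for _ in range(58): a, b = b, (a+b) % 10; table.append(b)`
def fibTable : Nat → Int → Int → List Int → List Int
  | 0, _, _, t => t
  | k+1, a, b, t => fibTable k b (PySem.Int.mod (a + b) 10) (t ++ [PySem.Int.mod (a + b) 10])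

def get_fibonacci_last_digit_with_pisano_alt (n : Int) : Int :=
  if n ≤ 1 then n
  else
    let table := fibTable 58 0 1 [0, 1]
    -- index n % 60 is always in [0, 60) so pyGet? never returns none; getD 0 is unreachable
    (PySem.List.pyGet? table (PySem.Int.mod n 60)).getD 0

-- ===== PRECONDITION & SPEC =====
def Spec_get_fibonacci_last_digit_with_pisano (n : Int) (out : Int) : Prop := out = get_fibonacci_last_digit_with_pisano_alt n
instance (n : Int) (out : Int) : Decidable (Spec_get_fibonacci_last_digit_with_pisano n out) := by unfold Spec_get_fibonacci_last_digit_with_pisano; infer_instance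

-- ===== CLAIM (what is proved, stated in full; the proofs are below) =====
def Claim_equal_get_fibonacci_last_digit_with_pisano : Prop := ∀ (n : Int), Dom_get_fibonacci_last_digit_with_pisano n → Spec_get_fibonacci_last_digit_with_pisano n (get_fibonacci_last_digit_with_pisano n)

-- ===== LEMMAS AND PROOFS =====

-- appending steps: running a+b steps = running a steps, then b steps
theorem fibLoop_add (a b : Nat) (s : Int × Int) :
    fibLoop (a + b) s = fibLoop b (fibLoop a s) := by
  induction a generalizing s with
  | zero => simp [fibLoop]
  | succ a ih =>
    obtain ⟨p, c⟩ := s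
    have : a + 1 + b = (a + b) + 1 := by omega
    rw [this]
    simp only [fibLoop]
    exact ih (c, p + c)

-- the loop's result mod 10 depends only on the state mod 10
theorem fibLoop_mod (k : Nat) (a b a' b' : Int)
    (ha : a % 10 = a' % 10) (hb : b % 10 = b' % 10) :
    (fibLoop k (a, b)).1 % 10 = (fibLoop k (a', b')).1 % 10 ∧
    (fibLoop k (a, b)).2 % 10 = (fibLoop k (a', b')).2 % 10 := by
  induction k generalizing a b a' b' with
  | zero => exact ⟨ha, hb⟩
  | succ k ih =>
    simp only [fibLoop]
    exact ih b (a + b) b' (a' + b') hb (by rw [Int.add_emod, ha, hb, ← Int.add_emod])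

theorem fibLoop_sixty : fibLoop 60 ((0 : Int), (1 : Int)) = (1548008755920, 2504730781961) := by
  decide

-- one full period does not change the last digit
theorem fibLoop_period (k : Nat) :
    (fibLoop (k + 60) ((0 : Int), 1)).2 % 10 = (fibLoop k ((0 : Int), 1)).2 % 10 := by
  have h := fibLoop_add 60 k ((0 : Int), 1)
  rw [Nat.add_comm k 60, h, fibLoop_sixty]
  exact (fibLoop_mod k 1548008755920 2504730781961 0 1 (by decide) (by decide)).2

-- periodicity: last digit of the loop's result depends only on k mod 60
theorem fibLoop_mod_sixty (k : Nat) :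
    (fibLoop k ((0 : Int), 1)).2 % 10 = (fibLoop (k % 60) ((0 : Int), 1)).2 % 10 := by
  induction k using Nat.strong_induction_on with
  | _ k ih =>
    by_cases h : k < 60
    · rw [Nat.mod_eq_of_lt h]
    · have hk : k = (k - 60) + 60 := by omega
      have hm : (k - 60 + 60) % 60 = (k - 60) % 60 := by omega
      rw [hk, fibLoop_period (k - 60), ih (k - 60) (by omega), hm]

-- the finite check connecting A's reduced loop with B's table, for each residue
set_option maxRecDepth 10000 in
theorem table_correct :
    ∀ j : Fin 60, 1 ≤ j.val →
      (fibLoop (j.val - 1) ((0 : Int), 1)).2 % 10 =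
        (PySem.List.pyGet? (fibTable 58 0 1 [0, 1]) (j.val : Int)).getD 0 := by
  decide

theorem pisanoReduce_small (n : Int) (h : n < 60) : pisanoReduce n = n := by
  rw [pisanoReduce]
  simp [show ¬ (60 ≤ n) by omega]

theorem pisanoReduce_eq (n : Int) (h2 : 2 ≤ n) (hr : PySem.Int.mod n 60 ≠ 0) :
    pisanoReduce n = PySem.Int.mod n 60 := by
  by_cases h : 60 ≤ n
  · rw [pisanoReduce, dif_pos h, if_pos hr]
    exact pisanoReduce_small _ (PySem.Int.mod_lt n (by omega))
  · have := PySem.Int.mod_eq_emod_of_pos (a := n) (b := 60) (by omega)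
    rw [pisanoReduce_small n (by omega), this, Int.emod_eq_of_lt (by omega) (by omega)]

theorem pisanoReduce_of_dvd (n : Int) (h : 60 ≤ n) (hr : PySem.Int.mod n 60 = 0) :
    pisanoReduce n = n := by
  rw [pisanoReduce, dif_pos h, if_neg (not_ne_iff.mpr hr)]

-- ===== VERDICT (by name: the statement is the Claim_ definition above) =====
theorem get_fibonacci_last_digit_with_pisano_spec : Claim_equal_get_fibonacci_last_digit_with_pisano := by
  intro n _
  unfold Spec_get_fibonacci_last_digit_with_pisano
  unfold get_fibonacci_last_digit_with_pisano get_fibonacci_last_digit_with_pisano_alt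
  by_cases h1 : n ≤ 1
  · simp [h1]
  · simp only [h1, if_false]
    have hn2 : 2 ≤ n := by omega
    have hmod := PySem.Int.mod_eq_emod_of_pos (a := n) (b := 60) (by omega)
    by_cases hr : PySem.Int.mod n 60 = 0
    · -- 60 divides n: A iterates all the way to n; last digit is 0, B reads table[0]
      have hd : (60 : Int) ∣ n := Int.dvd_of_emod_eq_zero (hmod ▸ hr)
      have h60 : 60 ≤ n := by omega
      rw [pisanoReduce_of_dvd n h60 hr, hr]
      have hkey : (n - 1).toNat % 60 = 59 := by omega
      have := fibLoop_mod_sixty (n - 1).toNat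
      rw [hkey] at this
      have hmod10 := PySem.Int.mod_eq_emod_of_pos (a := (fibLoop (n - 1).toNat ((0:Int), 1)).2) (b := 10) (by omega)
      rw [hmod10, this]
      decide
    · -- otherwise A iterates (n % 60) - 1 times; B reads table[n % 60]
      rw [pisanoReduce_eq n hn2 hr]
      set r := PySem.Int.mod n 60 with hrdef
      have hr0 : 0 ≤ r := PySem.Int.mod_nonneg n (by omega)
      have hr60 : r < 60 := PySem.Int.mod_lt n (by omega)
      have hr1 : 1 ≤ r := by omega
      have hfin : r.toNat < 60 := by omega
      have hj := table_correct ⟨r.toNat, hfin⟩ (by simp; omega)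
      have hc1 : ((⟨r.toNat, hfin⟩ : Fin 60).val : Int) = r := by simp; omega
      have hc2 : (⟨r.toNat, hfin⟩ : Fin 60).val - 1 = (r - 1).toNat := by simp
      rw [hc1, hc2] at hj
      have hmod10 := PySem.Int.mod_eq_emod_of_pos (a := (fibLoop (r - 1).toNat ((0:Int), 1)).2) (b := 10) (by omega)
      rw [hmod10, hj]
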